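-- pv_equiv track=rewrite | github.com/AJM432/Interactive-Sorting-Algorithms | sort.py | selection_sort_step
-- ===== SOURCE A (Python) =====
-- def selection_sort_step(array, current_index):
--     min_value = array[current_index]
--     min_index = current_index
--     for x in range(current_index+1, len(array)):
--         if array[x] < min_value:
--             min_value = array[x]
--             min_index = x
--
--     array[current_index], array[min_index] = array[min_index], array[current_index]
--     return array
-- ===== SOURCE B (Python) =====
-- def selection_sort_step(array, current_index):
--     order = sorted(range(current_index, len(array)), key=lambda i: array[i])
--     min_index = order[0]
--     array[current_index], array[min_index] = array[min_index], array[current_index]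
--     return array
-- ===== Notes on version B (the rewrite author's own statement) =====
-- stated objective: alternative
-- what changed: Instead of A's single fused scan that tracks the running minimum value and its index, B stably sorts the suffix's index range by element value and takes the head of the sorted list as the swap target (stability makes ties resolve to the first minimal index, matching A's strict-< rule).
import Mathlib
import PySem

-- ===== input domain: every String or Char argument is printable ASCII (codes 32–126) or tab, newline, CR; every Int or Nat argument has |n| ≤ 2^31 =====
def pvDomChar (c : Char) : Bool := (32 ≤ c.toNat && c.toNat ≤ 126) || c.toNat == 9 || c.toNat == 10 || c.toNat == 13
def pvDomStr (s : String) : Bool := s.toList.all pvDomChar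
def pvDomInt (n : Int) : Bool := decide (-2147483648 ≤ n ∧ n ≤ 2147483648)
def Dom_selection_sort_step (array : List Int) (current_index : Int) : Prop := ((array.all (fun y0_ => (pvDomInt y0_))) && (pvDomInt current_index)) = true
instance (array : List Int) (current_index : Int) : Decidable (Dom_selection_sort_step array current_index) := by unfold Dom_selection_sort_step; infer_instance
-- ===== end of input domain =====

-- B replaces A's fused min-tracking scan by a different algorithm: stably sort the suffix
-- index range by value and take the head (the first minimal index), then do the same swap.
-- Objective: alternative (sort-based, not faster).

-- ===== PORT A =====
def selection_sort_step (array : List Int) (current_index : Int) : List Int :=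
  let min_value := PySem.List.pyGetD array current_index 0
  let st :=
    (PySem.List.pyRange (current_index + 1) (array.length : Int) 1).foldl
      (fun p x =>
        if PySem.List.pyGetD array x 0 < p.1 then (PySem.List.pyGetD array x 0, x) else p)
      (min_value, current_index)
  PySem.List.pySetD
    (PySem.List.pySetD array current_index (PySem.List.pyGetD array st.2 0))
    st.2 (PySem.List.pyGetD array current_index 0)

-- ===== PORT B =====
def selection_sort_step_alt (array : List Int) (current_index : Int) : List Int :=
  let order := PySem.List.sorted
    (PySem.List.pyRange current_index (array.length : Int) 1)
    (fun i => PySem.List.pyGetD array i 0)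
  match order with
  | [] => []          -- order[0] raises IndexError on the empty range; outside Pre_
  | min_index :: _ =>
    PySem.List.pySetD
      (PySem.List.pySetD array current_index (PySem.List.pyGetD array min_index 0))
      min_index (PySem.List.pyGetD array current_index 0)

-- ===== PRECONDITION & SPEC =====
-- Pre_ excludes exactly current_index ≥ len and current_index < -len, where A raises IndexError
-- on array[current_index]; negative indices in [-len, -1] (Python wraparound) are kept and proved.
def Pre_selection_sort_step (array : List Int) (current_index : Int) : Prop :=
  -(array.length : Int) ≤ current_index ∧ current_index < (array.length : Int)
instance (array : List Int) (current_index : Int) : Decidable (Pre_selection_sort_step array current_index) := by unfold Pre_selection_sort_step; infer_instance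

def pvWitness_selection_sort_step : List Int × Int := ([3, 1, 2], 0)

def Spec_selection_sort_step (array : List Int) (current_index : Int) (out : List Int) : Prop := out = selection_sort_step_alt array current_index
instance (array : List Int) (current_index : Int) (out : List Int) : Decidable (Spec_selection_sort_step array current_index out) := by unfold Spec_selection_sort_step; infer_instance

-- ===== CLAIM =====
def Claim_equal_selection_sort_step : Prop := ∀ (array : List Int) (current_index : Int), Dom_selection_sort_step array current_index → Pre_selection_sort_step array current_index → Spec_selection_sort_step array current_index (selection_sort_step array current_index)

-- ===== LEMMAS AND PROOFS =====

-- A's fused scan carries (value, index); separating the pair, the index component is the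
-- "keep the index with strictly smaller value" fold and the value component is its value.
lemma pair_fold_eq (g : Int → Int) :
    ∀ (l : List Int) (i : Int),
      l.foldl (fun p x => if g x < p.1 then (g x, x) else p) (g i, i)
        = (g (l.foldl (fun h x => if g x < g h then x else h) i),
           l.foldl (fun h x => if g x < g h then x else h) i) := by
  intro l
  induction l with
  | nil => intro i; rfl
  | cons x t ih =>
    intro i
    simp only [List.foldl_cons]
    by_cases hx : g x < g i
    · rw [if_pos hx, if_pos hx, ih x]
    · rw [if_neg hx, if_neg hx, ih i]

-- The head of the insertion-sort fold evolves by the same "strictly smaller key wins" rule.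
lemma foldl_insertBy_head (before : Int → Int → Bool) :
    ∀ (l : List Int) (a : Int) (ac : List Int),
      ∃ t, l.foldl (fun s x => PySem.List.insertBy before x s) (a :: ac)
            = (l.foldl (fun h x => if before x h then x else h) a) :: t := by
  intro l
  induction l with
  | nil => intro a ac; exact ⟨ac, rfl⟩
  | cons x r ih =>
    intro a ac
    simp only [List.foldl_cons, PySem.List.insertBy]
    by_cases hx : before x a
    · rw [if_pos hx, if_pos hx]
      exact ih x (a :: ac)
    · rw [if_neg hx, if_neg hx]
      exact ih a (PySem.List.insertBy before x ac)

-- The head of sorted(a :: l, key=g) is the strict-min fold over l started at a (stability).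
lemma sorted_head (g : Int → Int) (l : List Int) (a : Int) :
    ∃ t, PySem.List.sorted (a :: l) g
          = (l.foldl (fun h x => if g x < g h then x else h) a) :: t := by
  rw [PySem.List.sorted_eq_foldl_insertBy, List.foldl_cons]
  simp only [PySem.List.insertBy]
  obtain ⟨t, h⟩ := foldl_insertBy_head (fun p q => decide (g p < g q)) l a []
  refine ⟨t, ?_⟩
  rw [h]
  have hfun : (fun (h x : Int) => if decide (g x < g h) = true then x else h)
      = fun h x => if g x < g h then x else h := by
    funext h x; simp
  rw [hfun]

-- ===== VERDICT =====
theorem selection_sort_step_spec : Claim_equal_selection_sort_step := by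
  intro array ci _hdom hpre
  obtain ⟨_hlo, hlt⟩ := hpre
  unfold Spec_selection_sort_step
  have hcons : PySem.List.pyRange ci (array.length : Int) 1
      = ci :: PySem.List.pyRange (ci + 1) (array.length : Int) 1 :=
    PySem.List.pyRange_one_cons hlt
  obtain ⟨t, horder⟩ := sorted_head (fun i => PySem.List.pyGetD array i 0)
    (PySem.List.pyRange (ci + 1) (array.length : Int) 1) ci
  simp only [selection_sort_step, selection_sort_step_alt, hcons, horder,
    pair_fold_eq (fun i => PySem.List.pyGetD array i 0)]
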